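-- pv_equiv track=rewrite | github.com/RussellAndrewEdson/AdventOfCode | 2019/day03.py | dist_along_wire
-- ===== SOURCE A (Python) =====
-- def manhattan_dist(point1, point2):
--     """Returns the Manhattan metric distance between the two points."""
--     return abs(point2[0] - point1[0]) + abs(point2[1] - point1[1])
--
-- def point_on_segment(p1, p2, point_to_check):
--     """True if the point to check appears on p1-p2."""
--     x, y = point_to_check
--     x1, y1 = p1
--     x2, y2 = p2
--
--     return min(x1, x2) <= x and x <= max(x1, x2) and \
--         min(y1, y2) <= y and y <= max(y1, y2)
--
-- def dist_along_wire(wire, point):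
--     """The distance along the wire to the given point."""
--     dist = 0
--     for index in range(len(wire) - 1):
--         p1, p2 = [wire[index], wire[index + 1]]
--         if point_on_segment(p1, p2, point):
--             dist = dist + manhattan_dist(p1, point)
--             break
--         else:
--             dist = dist + manhattan_dist(p1, p2)
--     return dist
-- ===== SOURCE B (Python) =====
-- def manhattan_dist(point1, point2):
--     return abs(point2[0] - point1[0]) + abs(point2[1] - point1[1])
--
--
-- def point_on_segment(p1, p2, point_to_check):
--     x, y = point_to_check
--     x1, y1 = p1
--     x2, y2 = p2
--     return min(x1, x2) <= x and x <= max(x1, x2) and \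
--         min(y1, y2) <= y and y <= max(y1, y2)
--
--
-- def dist_along_wire(wire, point):
--     """Distance along the wire to the point, computed BACK-TO-FRONT.
--
--     Walk the segments from the last to the first maintaining the distance
--     to the point measured from the start of the current suffix.  A segment
--     containing the point RESETS the value to manhattan_dist(p1, point)
--     (discarding everything after it), so the leftmost containing segment
--     automatically determines the result; if no segment contains the point
--     the value ends up being the full wire length.
--     """
--     dist = 0
--     for i in range(len(wire) - 2, -1, -1):
--         p1, p2 = wire[i], wire[i + 1]
--         if point_on_segment(p1, p2, point):
--             dist = manhattan_dist(p1, point)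
--         else:
--             dist = manhattan_dist(p1, p2) + dist
--     return dist
-- ===== Notes on version B (the rewrite author's own statement) =====
-- stated objective: alternative
-- what changed: B computes the answer back-to-front: a single reverse pass over the segments in which a segment containing the point RESETS the running value to manhattan_dist(p1, point) (discarding the suffix), so the leftmost match wins without any forward search or early break; A scans forward accumulating and breaks at the first match.
import Mathlib
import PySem

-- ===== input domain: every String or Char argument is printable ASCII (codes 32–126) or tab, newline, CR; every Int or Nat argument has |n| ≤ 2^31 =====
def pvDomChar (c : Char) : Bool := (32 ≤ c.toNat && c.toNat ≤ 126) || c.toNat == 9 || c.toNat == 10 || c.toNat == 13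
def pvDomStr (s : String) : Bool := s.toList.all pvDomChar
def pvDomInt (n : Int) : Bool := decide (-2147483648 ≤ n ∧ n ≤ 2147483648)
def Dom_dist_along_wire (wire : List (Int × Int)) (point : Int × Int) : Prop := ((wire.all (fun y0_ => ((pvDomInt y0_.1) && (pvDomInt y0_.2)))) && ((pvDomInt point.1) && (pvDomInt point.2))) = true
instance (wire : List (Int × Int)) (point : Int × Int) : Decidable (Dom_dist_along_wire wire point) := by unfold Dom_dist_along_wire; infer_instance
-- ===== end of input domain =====

-- B computes the distance in a single back-to-front pass in which a containing segment resets the running value (no break, no search); alternative decomposition, same O(n) cost.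


-- ===== PORT A =====
def manhattanDist (p1 p2 : Int × Int) : Int :=
  |p2.1 - p1.1| + |p2.2 - p1.2|

def pointOnSegment (p1 p2 pt : Int × Int) : Bool :=
  min p1.1 p2.1 ≤ pt.1 && pt.1 ≤ max p1.1 p2.1 &&
  min p1.2 p2.2 ≤ pt.2 && pt.2 ≤ max p1.2 p2.2

-- A's loop over index = 0 … len(wire)-2 visits the consecutive pairs (wire[index], wire[index+1]);
-- ported as the obvious structural recursion over the same consecutive pairs, carrying A's
-- accumulator `dist` and returning it at the break.
def distAGo (point : Int × Int) : List (Int × Int) → Int → Int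
  | p1 :: p2 :: rest, dist =>
      if pointOnSegment p1 p2 point then dist + manhattanDist p1 point
      else distAGo point (p2 :: rest) (dist + manhattanDist p1 p2)
  | _, dist => dist

def dist_along_wire (wire : List (Int × Int)) (point : Int × Int) : Int :=
  distAGo point wire 0

-- ===== PORT B =====
-- B's reversed-index loop over the consecutive pairs = a left fold over the reversed segment list;
-- a containing segment RESETS the running value, otherwise the segment length is prepended.
def dist_along_wire_alt (wire : List (Int × Int)) (point : Int × Int) : Int :=
  ((wire.zip wire.tail).reverse).foldl
    (fun dist s =>
      if pointOnSegment s.1 s.2 point then manhattanDist s.1 point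
      else manhattanDist s.1 s.2 + dist) 0

-- ===== PRECONDITION & SPEC =====
def Spec_dist_along_wire (wire : List (Int × Int)) (point : Int × Int) (out : Int) : Prop := out = dist_along_wire_alt wire point
instance (wire : List (Int × Int)) (point : Int × Int) (out : Int) : Decidable (Spec_dist_along_wire wire point out) := by unfold Spec_dist_along_wire; infer_instance

-- ===== CLAIM (what is proved, stated in full; the proofs are below) =====
def Claim_equal_dist_along_wire : Prop := ∀ (wire : List (Int × Int)) (point : Int × Int), Dom_dist_along_wire wire point → Spec_dist_along_wire wire point (dist_along_wire wire point)

-- ===== LEMMAS AND PROOFS =====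

theorem distAGo_acc (point : Int × Int) (wire : List (Int × Int)) (d : Int) :
    distAGo point wire d = d + distAGo point wire 0 := by
  induction wire generalizing d with
  | nil => simp [distAGo]
  | cons p1 rest ih =>
    cases rest with
    | nil => simp [distAGo]
    | cons p2 rest' =>
      by_cases h : pointOnSegment p1 p2 point
      · simp [distAGo, h]
      · simp only [distAGo, h, Bool.false_eq_true, if_false]
        rw [ih, ih (0 + manhattanDist p1 p2)]
        ring

-- B's fold over the reversed list is the right fold over the segments in order.
theorem alt_eq_foldr (wire : List (Int × Int)) (point : Int × Int) :
    dist_along_wire_alt wire point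
      = (wire.zip wire.tail).foldr
          (fun s dist =>
            if pointOnSegment s.1 s.2 point then manhattanDist s.1 point
            else manhattanDist s.1 s.2 + dist) 0 := by
  unfold dist_along_wire_alt
  rw [List.foldl_reverse]

theorem distAGo_eq_alt (point : Int × Int) (wire : List (Int × Int)) :
    distAGo point wire 0 = dist_along_wire_alt wire point := by
  induction wire with
  | nil => simp [distAGo, dist_along_wire_alt]
  | cons p1 rest ih =>
    cases rest with
    | nil => simp [distAGo, dist_along_wire_alt]
    | cons p2 rest' =>
      rw [alt_eq_foldr]
      by_cases h : pointOnSegment p1 p2 point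
      · simp [distAGo, h]
      · simp only [distAGo, h, Bool.false_eq_true, if_false]
        rw [distAGo_acc, ih, alt_eq_foldr]
        simp only [List.tail_cons, List.zip_cons_cons, List.foldr_cons, h,
          Bool.false_eq_true, if_false]
        ring

-- ===== VERDICT (by name: the statement is the Claim_ definition above) =====
theorem dist_along_wire_spec : Claim_equal_dist_along_wire := by
  intro wire point _
  unfold Spec_dist_along_wire dist_along_wire
  exact distAGo_eq_alt point wire
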